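-- pv_equiv track=rewrite | github.com/Jh123x/COMP-550-Algorithms-and-Analysis | Dynamic Programming/RodCuttingMaxPieces.py | rod_cutting_max_pieces
-- ===== SOURCE A (Python) =====
-- from typing import List
--
-- def rod_cutting_max_pieces(pieces: List[int], length: int) -> int:
--     """Optimal way to cut rods into the maximum pieces"""
--     dp = [0] * (length + 1)
--     for i in range(1, length + 1):
--         # Check if i is in pieces size
--         for j in range(len(pieces)):
--             piece_size = pieces[j]
--             if i == piece_size:
--                 dp[i] = max(dp[i], 1)
--                 continue
--             if i > piece_size:
--                 dp[i] = max(dp[i], dp[i-piece_size] + dp[piece_size])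
--
--     return dp[length], dp
-- ===== SOURCE B (Python) =====
-- from typing import List
--
--
-- def rod_cutting_max_pieces(pieces: List[int], length: int):
--     """Top-down memoized recursion instead of the bottom-up double loop;
--     the dp vector is produced by evaluating the memoized solver at every i."""
--     memo = {0: 0}
--
--     def solve(i):
--         if i in memo:
--             return memo[i]
--         best = 0
--         for p in pieces:
--             if p == i:
--                 best = max(best, 1)
--             elif 0 < p < i:
--                 best = max(best, solve(i - p) + solve(p))
--         memo[i] = best
--         return best
--
--     dp = [solve(i) for i in range(length + 1)]
--     return dp[length], dp
-- ===== Notes on version B (the rewrite author's own statement) =====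
-- stated objective: alternative
-- what changed: Replaces the bottom-up double loop over a mutated dp array with a top-down memoized recursion solve(i) (max over pieces of 1 at i==p and solve(i-p)+solve(p) for 0<p<i), evaluated at every i to build the dp vector.
import Mathlib
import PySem

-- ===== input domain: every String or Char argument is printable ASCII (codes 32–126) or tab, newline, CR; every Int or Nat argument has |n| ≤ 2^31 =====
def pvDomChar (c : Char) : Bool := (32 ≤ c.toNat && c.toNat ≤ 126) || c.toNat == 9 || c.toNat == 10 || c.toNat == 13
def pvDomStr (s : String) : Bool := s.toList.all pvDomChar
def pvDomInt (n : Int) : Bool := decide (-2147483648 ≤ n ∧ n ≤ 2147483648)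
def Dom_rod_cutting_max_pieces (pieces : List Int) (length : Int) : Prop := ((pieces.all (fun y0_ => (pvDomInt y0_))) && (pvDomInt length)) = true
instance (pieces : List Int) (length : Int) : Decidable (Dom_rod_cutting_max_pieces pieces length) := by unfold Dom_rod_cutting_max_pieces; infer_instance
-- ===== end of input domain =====

-- B replaces A's bottom-up double loop over a mutated dp array with a top-down
-- memoized recursion evaluated at every 0..length (alternative decomposition, not faster).

-- ===== PORT A =====
-- body of A's inner loop for a fixed outer index i (the dp[i] = max(...) updates)
def innerStepA (i : Int) (dp : List Int) (piece_size : Int) : List Int :=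
  if i = piece_size then
    PySem.List.pySetD dp i (max (PySem.List.pyGetD dp i 0) 1)
  else if i > piece_size then
    PySem.List.pySetD dp i (max (PySem.List.pyGetD dp i 0)
      (PySem.List.pyGetD dp (i - piece_size) 0 + PySem.List.pyGetD dp piece_size 0))
  else dp

def rod_cutting_max_pieces (pieces : List Int) (length : Int) : Int × List Int :=
  let dp0 : List Int := List.replicate (length + 1).toNat 0
  let dp := (PySem.List.pyRange 1 (length + 1) 1).foldl (fun dp i =>
    (PySem.List.pyRange 0 (pieces.length : Int) 1).foldl
      (fun dp j => innerStepA i dp (PySem.List.pyGetD pieces j 0)) dp) dp0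
  (PySem.List.pyGetD dp length 0, dp)

-- ===== PORT B =====
-- Source B's recursive `solve` with its memo dict threaded through, plus a fuel
-- bound on the recursion depth; exact because every recursive call strictly
-- decreases i, so fuel i+1 suffices (solveM_correct below).  `goM` is the
-- `for p in pieces` loop of `solve`, carrying `best` and the memo.
mutual
def solveM (pieces : List Int) (fuel i : Nat) (memo : PySem.Dict Int Int) :
    Int × PySem.Dict Int Int :=
  match fuel with
  | 0 => (0, memo)
  | fuel + 1 =>
    match memo.get? (i : Int) with
    | some v => (v, memo)
    | none =>
      let r := goM pieces fuel i pieces 0 memo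
      (r.1, r.2.insert (i : Int) r.1)
termination_by (fuel, 0)

def goM (pieces : List Int) (fuel i : Nat) (ps : List Int) (best : Int)
    (memo : PySem.Dict Int Int) : Int × PySem.Dict Int Int :=
  match ps with
  | [] => (best, memo)
  | p :: rest =>
    if (i : Int) = p then goM pieces fuel i rest (max best 1) memo
    else if 0 < p ∧ p < (i : Int) then
      let a := solveM pieces fuel (i - p.toNat) memo
      let b := solveM pieces fuel p.toNat a.2
      goM pieces fuel i rest (max best (a.1 + b.1)) b.2
    else goM pieces fuel i rest best memo
termination_by (fuel, ps.length + 1)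
end

def rod_cutting_max_pieces_alt (pieces : List Int) (length : Int) : Int × List Int :=
  let r := (PySem.List.pyRange 0 (length + 1) 1).foldl
    (fun (acc : List Int × PySem.Dict Int Int) i =>
      let s := solveM pieces (i.toNat + 1) i.toNat acc.2
      (s.1 :: acc.1, s.2))
    ([], PySem.Dict.ofList [((0 : Int), (0 : Int))])
  let dp := r.1.reverse
  (PySem.List.pyGetD dp length 0, dp)

-- ===== PRECONDITION & SPEC =====
-- Pre_ excludes exactly the inputs where A raises IndexError: a negative length
-- (dp is empty, dp[length] fails), or length ≥ 1 together with a negative piece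
-- (dp[i - piece_size] runs past the array).
def Pre_rod_cutting_max_pieces (pieces : List Int) (length : Int) : Prop :=
  0 ≤ length ∧ (length = 0 ∨ ∀ p ∈ pieces, 0 ≤ p)
instance (pieces : List Int) (length : Int) : Decidable (Pre_rod_cutting_max_pieces pieces length) := by unfold Pre_rod_cutting_max_pieces; infer_instance

def pvWitness_rod_cutting_max_pieces : List Int × Int := ([2, 3], 7)

def Spec_rod_cutting_max_pieces (pieces : List Int) (length : Int) (out : Int × List Int) : Prop := out = rod_cutting_max_pieces_alt pieces length
instance (pieces : List Int) (length : Int) (out : Int × List Int) : Decidable (Spec_rod_cutting_max_pieces pieces length out) := by unfold Spec_rod_cutting_max_pieces; infer_instance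

-- ===== CLAIM (what is proved, stated in full; the proofs are below) =====
def Claim_equal_rod_cutting_max_pieces : Prop := ∀ (pieces : List Int) (length : Int), Dom_rod_cutting_max_pieces pieces length → Pre_rod_cutting_max_pieces pieces length → Spec_rod_cutting_max_pieces pieces length (rod_cutting_max_pieces pieces length)

-- ===== LEMMAS AND PROOFS =====

-- proof-level (memo-free) description of B's recursion: the `for p in pieces`
-- loop of `solve` with a recursive-call oracle `solveRec` …
def solveGo (solveRec : Nat → Int) (i : Nat) : List Int → Int → Int
  | [], best => best
  | p :: rest, best =>
    if (i : Int) = p then solveGo solveRec i rest (max best 1)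
    else if 0 < p ∧ p < (i : Int) then
      solveGo solveRec i rest (max best (solveRec (i - p.toNat) + solveRec p.toNat))
    else solveGo solveRec i rest best

-- … tied with fuel (the i = 0 branch is the seeded memo {0: 0})
def solveFuel (pieces : List Int) : Nat → Nat → Int
  | 0, _ => 0
  | fuel + 1, i => if i = 0 then 0 else solveGo (solveFuel pieces fuel) i pieces 0

-- the value Source B's solve(i) returns
def solveTop (pieces : List Int) (i : Nat) : Int := solveFuel pieces (i + 1) i

theorem solveGo_congr (f g : Nat → Int) (i : Nat) (ps : List Int) (best : Int)
    (h : ∀ j, j < i → f j = g j) : solveGo f i ps best = solveGo g i ps best := by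
  induction ps generalizing best with
  | nil => rfl
  | cons p rest ih =>
    simp only [solveGo]
    split_ifs with h1 h2
    · exact ih _
    · rw [h (i - p.toNat) (by omega), h p.toNat (by omega)]
      exact ih _
    · exact ih _

theorem solveFuel_eq_top (pieces : List Int) (fuel i : Nat) (h : i < fuel) :
    solveFuel pieces fuel i = solveTop pieces i := by
  induction fuel using Nat.strong_induction_on generalizing i with
  | _ fuel IH =>
    match fuel, h with
    | fuel + 1, h =>
      rcases Nat.lt_or_ge i fuel with hlt | hge
      · show _ = solveFuel pieces (i + 1) i
        simp only [solveFuel]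
        split_ifs with h0
        · rfl
        · exact solveGo_congr _ _ _ _ _ (fun j hj => by
            rw [IH fuel (by omega) j (by omega), IH i (by omega) j (by omega)])
      · have : i = fuel := by omega
        subst this; rfl

theorem solveTop_zero (pieces : List Int) : solveTop pieces 0 = 0 := rfl

theorem solveGo_eq_top (pieces : List Int) (i : Nat) (h1 : 1 ≤ i) :
    solveGo (solveTop pieces) i pieces 0 = solveTop pieces i := by
  show _ = solveFuel pieces (i + 1) i
  simp only [solveFuel, if_neg (by omega : ¬ i = 0)]
  exact solveGo_congr _ _ _ _ _ (fun j hj => (solveFuel_eq_top pieces i j hj).symm)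

-- B side: the memo dict always holds already-computed values of solve
def SInv (pieces : List Int) (m : PySem.Dict Int Int) : Prop :=
  m.get? 0 = some 0 ∧ ∀ (n : Nat) (v : Int), m.get? (n : Int) = some v → v = solveTop pieces n

theorem solveM_correct (pieces : List Int) : ∀ (fuel i : Nat) (m : PySem.Dict Int Int),
    i < fuel → SInv pieces m →
    (solveM pieces fuel i m).1 = solveTop pieces i ∧ SInv pieces (solveM pieces fuel i m).2 := by
  intro fuel
  induction fuel with
  | zero => intro i m hi; omega
  | succ fuel IH =>
    have hgo : ∀ (i : Nat), i ≤ fuel → ∀ (ps : List Int) (best : Int) (m : PySem.Dict Int Int),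
        SInv pieces m →
        (goM pieces fuel i ps best m).1 = solveGo (solveTop pieces) i ps best ∧
          SInv pieces (goM pieces fuel i ps best m).2 := by
      intro i hi ps
      induction ps with
      | nil => intro best m hm; simp only [goM]; exact ⟨rfl, hm⟩
      | cons p rest ihps =>
        intro best m hm
        simp only [goM, solveGo]
        split_ifs with h1 h2
        · exact ihps _ _ hm
        · have ha := IH (i - p.toNat) m (by omega) hm
          have hb := IH p.toNat (solveM pieces fuel (i - p.toNat) m).2 (by omega) ha.2
          rw [ha.1, hb.1] at *
          exact ihps _ _ hb.2
        · exact ihps _ _ hm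
    intro i m hi hm
    simp only [solveM]
    cases hget : m.get? (i : Int) with
    | some v => exact ⟨hm.2 i v hget, hm⟩
    | none =>
      have hi0 : i ≠ 0 := by
        intro h0; subst h0
        rw [show ((0 : Nat) : Int) = (0 : Int) by norm_num, hm.1] at hget
        exact absurd hget (by simp)
      have hr := hgo i (by omega) pieces 0 m hm
      have hval : (goM pieces fuel i pieces 0 m).1 = solveTop pieces i := by
        rw [hr.1]; exact solveGo_eq_top pieces i (by omega)
      refine ⟨hval, ?_, ?_⟩
      · rw [PySem.Dict.get?_insert_of_ne _ _ (by omega : (0 : Int) ≠ (i : Int)), hr.2.1]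
      · intro n v hv
        by_cases hn : n = i
        · subst hn
          rw [PySem.Dict.get?_insert_self] at hv
          cases hv; exact hval
        · rw [PySem.Dict.get?_insert_of_ne _ _ (by omega : ((n : Nat) : Int) ≠ (i : Int))] at hv
          exact hr.2.2 n v hv

theorem seed_inv (pieces : List Int) :
    SInv pieces (PySem.Dict.ofList [((0 : Int), (0 : Int))]) := by
  have h : ∀ x : Int, (PySem.Dict.ofList [((0 : Int), (0 : Int))]).get? x
      = if x = 0 then some 0 else none := by
    intro x
    by_cases hx : x = 0 <;>
      simp [PySem.Dict.ofList, PySem.Dict.get?, PySem.Dict.insert, PySem.Dict.empty,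
        PySem.Dict.contains, PySem.Dict.update, hx]
    exact fun h => hx h.symm
  refine ⟨by simp [h], fun n v hv => ?_⟩
  rw [h] at hv
  split_ifs at hv with hn
  have : n = 0 := by omega
  subst this
  cases hv; rfl

theorem foldB (pieces : List Int) (ns : List Nat) (acc : List Int)
    (m : PySem.Dict Int Int) (hm : SInv pieces m) :
    ((ns.map (fun n : Nat => (n : Int))).foldl
        (fun (acc : List Int × PySem.Dict Int Int) i =>
          let s := solveM pieces (i.toNat + 1) i.toNat acc.2
          (s.1 :: acc.1, s.2)) (acc, m)).1
      = (ns.map (solveTop pieces)).reverse ++ acc := by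
  induction ns generalizing acc m with
  | nil => simp
  | cons n rest ih =>
    simp only [List.map_cons, List.foldl_cons, Int.toNat_natCast, List.reverse_cons]
    have hs := solveM_correct pieces (n + 1) n m (by omega) hm
    rw [hs.1, ih (solveTop pieces n :: acc) _ hs.2]
    simp

theorem getD_mapS (pieces : List Int) (T : Nat) :
    PySem.List.pyGetD ((List.range (T + 1)).map (solveTop pieces)) (T : Int) 0
      = solveTop pieces T := by
  rw [PySem.List.pyGetD_natCast]
  simp [List.getD]

theorem altB (pieces : List Int) (T : Nat) :
    rod_cutting_max_pieces_alt pieces (T : Int)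
      = (solveTop pieces T, (List.range (T + 1)).map (solveTop pieces)) := by
  have hrange : PySem.List.pyRange 0 ((T : Int) + 1) 1
      = (List.range (T + 1)).map (fun n : Nat => (n : Int)) := by
    rw [PySem.List.pyRange_one]
    have : (((T : Int) + 1) - 0).toNat = T + 1 := by omega
    rw [this]
    simp
  simp only [rod_cutting_max_pieces_alt, hrange]
  rw [foldB pieces (List.range (T + 1)) [] _ (seed_inv pieces)]
  simp only [List.append_nil, List.reverse_reverse]
  rw [getD_mapS]

-- A side: the dp array after the outer iterations 1..k of A have run
def dpState (pieces : List Int) (T k : Nat) : List Int :=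
  (List.range (T + 1)).map (fun j => if j ≤ k then solveTop pieces j else 0)

theorem dpState_length (pieces : List Int) (T k : Nat) :
    (dpState pieces T k).length = T + 1 := by simp [dpState]

theorem dpState_getD (pieces : List Int) (T k j : Nat) (hj : j < T + 1) :
    (dpState pieces T k).getD j 0 = if j ≤ k then solveTop pieces j else 0 := by
  simp [dpState, List.getD, hj]

-- A's inner loop over the pieces, for a fixed outer index i, computes exactly
-- solveGo on the running cell dp[i]
theorem innerA (pieces : List Int) (i : Nat) (h1 : 1 ≤ i) (dp : List Int)
    (hiL : i < dp.length)
    (hfin : ∀ k : Nat, k < i → dp.getD k 0 = solveTop pieces k)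
    (ps : List Int) (hpos : ∀ p ∈ ps, 0 ≤ p) (cur : Int) :
    ps.foldl (innerStepA (i : Int)) (dp.set i cur)
      = dp.set i (solveGo (solveTop pieces) i ps cur) := by
  induction ps generalizing cur with
  | nil => rfl
  | cons p rest ih =>
    have hp : 0 ≤ p := hpos p (by simp)
    have hrest : ∀ q ∈ rest, 0 ≤ q := fun q hq => hpos q (by simp [hq])
    have hgetI : PySem.List.pyGetD (dp.set i cur) (i : Int) 0 = cur := by
      simp [PySem.List.pyGetD_natCast, List.getD, hiL]
    have hgetLT : ∀ k : Nat, k < i →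
        PySem.List.pyGetD (dp.set i cur) (k : Int) 0 = solveTop pieces k := by
      intro k hk
      rw [PySem.List.pyGetD_natCast]
      have : (dp.set i cur).getD k 0 = dp.getD k 0 := by
        simp [List.getD, List.getElem?_set_ne (by omega : i ≠ k)]
      rw [this]; exact hfin k hk
    simp only [List.foldl_cons, solveGo]
    by_cases hip : (i : Int) = p
    · rw [innerStepA, if_pos hip, hgetI, PySem.List.pySetD_natCast, List.set_set,
        if_pos hip]
      exact ih hrest _
    · by_cases hgt : (i : Int) > p
      · rw [innerStepA, if_neg hip, if_pos hgt]
        rcases eq_or_lt_of_le hp with hp0 | hp0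
        · -- p = 0 : reads dp[i] (= cur) and dp[0] (= 0); a no-op for both sides
          have hpz : p = 0 := hp0.symm
          have hget0 : PySem.List.pyGetD (dp.set i cur) p 0 = 0 := by
            rw [hpz]
            have h := hgetLT 0 (by omega)
            simpa [solveTop_zero] using h
          have hgetIP : PySem.List.pyGetD (dp.set i cur) ((i : Int) - p) 0 = cur := by
            rw [hpz]; simpa using hgetI
          rw [hget0, hgetIP, hgetI, PySem.List.pySetD_natCast, List.set_set]
          have hmax : max cur (cur + 0) = cur := by omega
          rw [hmax, if_neg hip, if_neg (by omega : ¬ ((0:Int) < p ∧ p < (i : Int)))]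
          exact ih hrest _
        · -- 0 < p < i : reads the finished cells dp[i-p] and dp[p]
          have e1 : (i : Int) - p = (((i - p.toNat : Nat) : Nat) : Int) := by omega
          have e2 : p = ((p.toNat : Nat) : Int) := by omega
          have v1 : PySem.List.pyGetD (dp.set i cur) ((i : Int) - p) 0
              = solveTop pieces (i - p.toNat) := by
            rw [e1]; exact hgetLT _ (by omega)
          have v2 : PySem.List.pyGetD (dp.set i cur) p 0 = solveTop pieces p.toNat := by
            rw [e2]; exact hgetLT _ (by omega)
          rw [hgetI, v1, v2, PySem.List.pySetD_natCast, List.set_set,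
            if_neg hip, if_pos ⟨hp0, hgt⟩]
          exact ih hrest _
      · rw [innerStepA, if_neg hip, if_neg hgt,
          if_neg hip, if_neg (by omega : ¬ ((0:Int) < p ∧ p < (i : Int)))]
        exact ih hrest _

theorem set_self_of_getElem (xs : List Int) (i : Nat) (v : Int) (h : i < xs.length)
    (hv : xs[i] = v) : xs = xs.set i v := by
  apply List.ext_getElem (by simp)
  intro n h1 h2
  rw [List.getElem_set]
  split_ifs with he
  · subst he; exact hv
  · rfl

theorem outerA (pieces : List Int) (hpos : ∀ p ∈ pieces, 0 ≤ p) (T k : Nat) (hk : k ≤ T) :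
    (PySem.List.pyRange 1 ((k : Int) + 1) 1).foldl
        (fun dp i => pieces.foldl (innerStepA i) dp) (List.replicate (T + 1) 0)
      = dpState pieces T k := by
  induction k with
  | zero =>
    rw [PySem.List.pyRange_one_eq_nil (by simp)]
    apply List.ext_getElem (by simp [dpState])
    intro n h1 h2
    simp only [dpState, List.foldl_nil, List.getElem_replicate, List.getElem_map,
      List.getElem_range]
    split_ifs with h0
    · have : n = 0 := by omega
      subst this; rfl
    · rfl
  | succ k ihk =>
    have hk' : k ≤ T := by omega
    have hcast : (((k + 1 : Nat) : Int) + 1) = ((k : Int) + 1) + 1 := by push_cast; ring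
    rw [hcast, PySem.List.pyRange_one_succ_right (by omega : (1:Int) ≤ (k : Int) + 1),
      List.foldl_append, ihk hk']
    simp only [List.foldl_cons, List.foldl_nil]
    have hcast2 : ((k : Int) + 1) = (((k + 1 : Nat) : Nat) : Int) := by push_cast; ring
    rw [hcast2]
    have hset : dpState pieces T k = (dpState pieces T k).set (k + 1) 0 := by
      apply set_self_of_getElem _ _ _ (by simp [dpState]; omega)
      simp [dpState]
    rw [hset,
      innerA pieces (k + 1) (by omega) (dpState pieces T k)
        (by rw [dpState_length]; omega)
        (fun j hj => by rw [dpState_getD _ _ _ _ (by omega), if_pos (by omega)])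
        pieces hpos 0,
      solveGo_eq_top pieces (k + 1) (by omega)]
    apply List.ext_getElem (by simp [dpState])
    intro n h1 h2
    rw [List.getElem_set]
    simp only [dpState, List.getElem_map, List.getElem_range]
    split_ifs with he hb1 hb2 <;> first | rfl | omega | (subst he; rfl)

theorem rod_eq (pieces : List Int) (length : Int)
    (h : Pre_rod_cutting_max_pieces pieces length) :
    rod_cutting_max_pieces pieces length = rod_cutting_max_pieces_alt pieces length := by
  obtain ⟨hl, hor⟩ := h
  obtain ⟨T, hT⟩ : ∃ T : Nat, length = (T : Int) := ⟨length.toNat, by omega⟩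
  subst hT
  rw [altB]
  have hconv : (fun (dp : List Int) (i : Int) =>
      (PySem.List.pyRange 0 (pieces.length : Int) 1).foldl
        (fun dp j => innerStepA i dp (PySem.List.pyGetD pieces j 0)) dp)
      = fun (dp : List Int) (i : Int) => pieces.foldl (innerStepA i) dp := by
    funext dp i
    exact PySem.List.foldl_pyRange_zero_pyGetD' pieces 0 (innerStepA i) dp
  rcases hor with h0 | hall
  · have hT0 : T = 0 := by omega
    subst hT0
    simp only [rod_cutting_max_pieces]
    rw [show PySem.List.pyRange 1 ((((0:Nat)):Int) + 1) 1 = [] from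
        PySem.List.pyRange_one_eq_nil (by simp), List.foldl_nil]
    rw [show ((((0:Nat)):Int) + 1).toNat = 1 from by simp]
    rw [show List.replicate 1 (0:Int) = [0] from rfl, List.range_one]
    simp only [List.map_cons, List.map_nil, solveTop_zero]
    rw [show (((0:Nat)):Int) = (0:Int) from rfl, PySem.List.pyGetD_zero_cons]
  · simp only [rod_cutting_max_pieces, hconv]
    have hrep : (((T : Nat) : Int) + 1).toNat = T + 1 := by omega
    rw [hrep, outerA pieces hall T T (le_refl T)]
    have hd : dpState pieces T T = (List.range (T + 1)).map (solveTop pieces) := by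
      simp only [dpState]
      apply List.map_congr_left
      intro j hj
      rw [if_pos (by have := List.mem_range.mp hj; omega)]
    rw [hd, getD_mapS]

-- ===== VERDICT (by name: the statement is the Claim_ definition above) =====
theorem rod_cutting_max_pieces_spec : Claim_equal_rod_cutting_max_pieces := by
  intro pieces length _ hpre
  exact rod_eq pieces length hpre
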